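-- pv_equiv track=rewrite | github.com/nkarasiak/dzetsaka | ui/wizard_widget.py | _classifier_available
-- ===== SOURCE A (Python) =====
-- _CLASSIFIER_META = [
--     ("GMM", "Gaussian Mixture Model", False, False, False, False),
--     ("RF", "Random Forest", True, False, False, False),
--     ("SVM", "Support Vector Machine", True, False, False, False),
--     ("KNN", "K-Nearest Neighbors", True, False, False, False),
--     ("XGB", "XGBoost", False, True, False, False),
--     ("LGB", "LightGBM", False, False, True, False),
--     ("CB", "CatBoost", False, False, False, True),
--     ("ET", "Extra Trees", True, False, False, False),
--     ("GBC", "Gradient Boosting Classifier", True, False, False, False),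
--     ("LR", "Logistic Regression", True, False, False, False),
--     ("NB", "Gaussian Naive Bayes", True, False, False, False),
--     ("MLP", "Multi-layer Perceptron", True, False, False, False),
-- ]
--
-- def _classifier_available(code, deps):
--     # type: (str, Dict[str, bool]) -> bool
--     """Return True when all hard dependencies for *code* are satisfied."""
--     for c, _name, needs_sk, needs_xgb, needs_lgb, needs_cb in _CLASSIFIER_META:
--         if c == code:
--             if needs_sk and not deps.get("sklearn", False):
--                 return False
--             if needs_xgb and not deps.get("xgboost", False):
--                 return False
--             if needs_lgb and not deps.get("lightgbm", False):
--                 return False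
--             if needs_cb and not deps.get("catboost", False):
--                 return False
--             return True
--     return False
-- ===== SOURCE B (Python) =====
-- # Inverted strategy: instead of looking up the classifier and checking its flags,
-- # start from the set of ALL known classifiers and eliminate, per missing library,
-- # the whole group of classifiers that needs it; then answer by set membership.
-- _NEEDS = [
--     ("sklearn", frozenset({"RF", "SVM", "KNN", "ET", "GBC", "LR", "NB", "MLP"})),
--     ("xgboost", frozenset({"XGB"})),
--     ("lightgbm", frozenset({"LGB"})),
--     ("catboost", frozenset({"CB"})),
-- ]
-- _ALL = frozenset({"GMM"}).union(*(group for _lib, group in _NEEDS))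
--
-- def _classifier_available(code, deps):
--     """Return True when all hard dependencies for *code* are satisfied."""
--     avail = set(_ALL)
--     for lib, group in _NEEDS:
--         if not deps.get(lib, False):
--             avail -= group
--     return code in avail
-- ===== Notes on version B (the rewrite author's own statement) =====
-- stated objective: alternative
-- what changed: Inverts the control flow: instead of scanning the classifier table for the code and checking its four dependency flags with early returns, B starts from the set of all known classifiers and, for each missing library, subtracts the whole group of classifiers that requires it, then answers by a single set-membership test.
import Mathlib
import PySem

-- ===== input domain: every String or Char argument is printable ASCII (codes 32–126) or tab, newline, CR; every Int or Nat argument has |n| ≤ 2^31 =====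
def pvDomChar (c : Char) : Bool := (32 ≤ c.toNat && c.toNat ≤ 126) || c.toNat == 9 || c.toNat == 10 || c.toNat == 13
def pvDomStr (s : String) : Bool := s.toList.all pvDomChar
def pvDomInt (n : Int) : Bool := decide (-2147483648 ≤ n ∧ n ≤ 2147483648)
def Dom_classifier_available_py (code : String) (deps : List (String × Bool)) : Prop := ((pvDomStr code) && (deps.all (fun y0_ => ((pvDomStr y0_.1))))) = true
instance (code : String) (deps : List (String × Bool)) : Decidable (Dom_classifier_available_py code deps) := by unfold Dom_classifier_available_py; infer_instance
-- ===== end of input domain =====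

-- B inverts A's control flow: instead of scanning the table for the code and checking its
-- flags with early returns, it subtracts from the set of all classifiers the group needing
-- each missing library, then tests membership (objective: alternative).

-- deps.get(k, False): first-match lookup with default False (Python dict.get on the association list)
def pvGetD (deps : List (String × Bool)) (k : String) : Bool :=
  match deps with
  | [] => false
  | (k', v) :: rest => if k' == k then v else pvGetD rest k

-- ===== PORT A =====
def pvMeta : List (String × String × Bool × Bool × Bool × Bool) :=
  [("GMM", "Gaussian Mixture Model", false, false, false, false),
   ("RF", "Random Forest", true, false, false, false),
   ("SVM", "Support Vector Machine", true, false, false, false),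
   ("KNN", "K-Nearest Neighbors", true, false, false, false),
   ("XGB", "XGBoost", false, true, false, false),
   ("LGB", "LightGBM", false, false, true, false),
   ("CB", "CatBoost", false, false, false, true),
   ("ET", "Extra Trees", true, false, false, false),
   ("GBC", "Gradient Boosting Classifier", true, false, false, false),
   ("LR", "Logistic Regression", true, false, false, false),
   ("NB", "Gaussian Naive Bayes", true, false, false, false),
   ("MLP", "Multi-layer Perceptron", true, false, false, false)]

def pvAGo (code : String) (deps : List (String × Bool)) :
    List (String × String × Bool × Bool × Bool × Bool) → Bool
  | [] => false
  | (c, _name, sk, xg, lg, cb) :: rest =>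
    if c == code then
      if sk && !(pvGetD deps "sklearn") then false
      else if xg && !(pvGetD deps "xgboost") then false
      else if lg && !(pvGetD deps "lightgbm") then false
      else if cb && !(pvGetD deps "catboost") then false
      else true
    else pvAGo code deps rest

def classifier_available_py (code : String) (deps : List (String × Bool)) : Bool :=
  pvAGo code deps pvMeta

-- ===== PORT B =====
-- _NEEDS: each library with the group of classifiers requiring it
def pvNeeds : List (String × List String) :=
  [("sklearn", ["RF", "SVM", "KNN", "ET", "GBC", "LR", "NB", "MLP"]),
   ("xgboost", ["XGB"]),
   ("lightgbm", ["LGB"]),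
   ("catboost", ["CB"])]

-- _ALL = {"GMM"} ∪ all groups (a Python frozenset; only membership is used, list order immaterial)
def pvAll : List String :=
  "GMM" :: pvNeeds.foldl (fun acc lg => acc ++ lg.2) []

def classifier_available_py_alt (code : String) (deps : List (String × Bool)) : Bool :=
  (pvNeeds.foldl
      (fun avail lg =>
        if pvGetD deps lg.1 then avail
        else avail.filter (fun c => !(lg.2.contains c)))
      pvAll).contains code

-- ===== PRECONDITION & SPEC =====
def Spec_classifier_available_py (code : String) (deps : List (String × Bool)) (out : Bool) : Prop := out = classifier_available_py_alt code deps
instance (code : String) (deps : List (String × Bool)) (out : Bool) : Decidable (Spec_classifier_available_py code deps out) := by unfold Spec_classifier_available_py; infer_instance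

-- ===== CLAIM (what is proved, stated in full; the proofs are below) =====
def Claim_equal_classifier_available_py : Prop := ∀ (code : String) (deps : List (String × Bool)), Dom_classifier_available_py code deps → Spec_classifier_available_py code deps (classifier_available_py code deps)

-- ===== LEMMAS AND PROOFS =====

-- ===== VERDICT (by name: the statement is the Claim_ definition above) =====
set_option maxHeartbeats 4000000 in
theorem classifier_available_py_spec : Claim_equal_classifier_available_py := by
  intro code deps _
  unfold Spec_classifier_available_py
  by_cases h0 : code = "GMM"
  case pos =>
    subst h0
    cases hs : pvGetD deps "sklearn" <;> cases hx : pvGetD deps "xgboost" <;> cases hl : pvGetD deps "lightgbm" <;> cases hc : pvGetD deps "catboost" <;>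
      simp [classifier_available_py, classifier_available_py_alt, pvAGo, pvMeta, pvNeeds, pvAll, List.foldl, List.filter, List.contains_cons, List.contains_nil, hs, hx, hl, hc]
  by_cases h1 : code = "RF"
  case pos =>
    subst h1
    cases hs : pvGetD deps "sklearn" <;> cases hx : pvGetD deps "xgboost" <;> cases hl : pvGetD deps "lightgbm" <;> cases hc : pvGetD deps "catboost" <;>
      simp [classifier_available_py, classifier_available_py_alt, pvAGo, pvMeta, pvNeeds, pvAll, List.foldl, List.filter, List.contains_cons, List.contains_nil, hs, hx, hl, hc]
  by_cases h2 : code = "SVM"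
  case pos =>
    subst h2
    cases hs : pvGetD deps "sklearn" <;> cases hx : pvGetD deps "xgboost" <;> cases hl : pvGetD deps "lightgbm" <;> cases hc : pvGetD deps "catboost" <;>
      simp [classifier_available_py, classifier_available_py_alt, pvAGo, pvMeta, pvNeeds, pvAll, List.foldl, List.filter, List.contains_cons, List.contains_nil, hs, hx, hl, hc]
  by_cases h3 : code = "KNN"
  case pos =>
    subst h3
    cases hs : pvGetD deps "sklearn" <;> cases hx : pvGetD deps "xgboost" <;> cases hl : pvGetD deps "lightgbm" <;> cases hc : pvGetD deps "catboost" <;>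
      simp [classifier_available_py, classifier_available_py_alt, pvAGo, pvMeta, pvNeeds, pvAll, List.foldl, List.filter, List.contains_cons, List.contains_nil, hs, hx, hl, hc]
  by_cases h4 : code = "XGB"
  case pos =>
    subst h4
    cases hs : pvGetD deps "sklearn" <;> cases hx : pvGetD deps "xgboost" <;> cases hl : pvGetD deps "lightgbm" <;> cases hc : pvGetD deps "catboost" <;>
      simp [classifier_available_py, classifier_available_py_alt, pvAGo, pvMeta, pvNeeds, pvAll, List.foldl, List.filter, List.contains_cons, List.contains_nil, hs, hx, hl, hc]
  by_cases h5 : code = "LGB"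
  case pos =>
    subst h5
    cases hs : pvGetD deps "sklearn" <;> cases hx : pvGetD deps "xgboost" <;> cases hl : pvGetD deps "lightgbm" <;> cases hc : pvGetD deps "catboost" <;>
      simp [classifier_available_py, classifier_available_py_alt, pvAGo, pvMeta, pvNeeds, pvAll, List.foldl, List.filter, List.contains_cons, List.contains_nil, hs, hx, hl, hc]
  by_cases h6 : code = "CB"
  case pos =>
    subst h6
    cases hs : pvGetD deps "sklearn" <;> cases hx : pvGetD deps "xgboost" <;> cases hl : pvGetD deps "lightgbm" <;> cases hc : pvGetD deps "catboost" <;>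
      simp [classifier_available_py, classifier_available_py_alt, pvAGo, pvMeta, pvNeeds, pvAll, List.foldl, List.filter, List.contains_cons, List.contains_nil, hs, hx, hl, hc]
  by_cases h7 : code = "ET"
  case pos =>
    subst h7
    cases hs : pvGetD deps "sklearn" <;> cases hx : pvGetD deps "xgboost" <;> cases hl : pvGetD deps "lightgbm" <;> cases hc : pvGetD deps "catboost" <;>
      simp [classifier_available_py, classifier_available_py_alt, pvAGo, pvMeta, pvNeeds, pvAll, List.foldl, List.filter, List.contains_cons, List.contains_nil, hs, hx, hl, hc]
  by_cases h8 : code = "GBC"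
  case pos =>
    subst h8
    cases hs : pvGetD deps "sklearn" <;> cases hx : pvGetD deps "xgboost" <;> cases hl : pvGetD deps "lightgbm" <;> cases hc : pvGetD deps "catboost" <;>
      simp [classifier_available_py, classifier_available_py_alt, pvAGo, pvMeta, pvNeeds, pvAll, List.foldl, List.filter, List.contains_cons, List.contains_nil, hs, hx, hl, hc]
  by_cases h9 : code = "LR"
  case pos =>
    subst h9
    cases hs : pvGetD deps "sklearn" <;> cases hx : pvGetD deps "xgboost" <;> cases hl : pvGetD deps "lightgbm" <;> cases hc : pvGetD deps "catboost" <;>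
      simp [classifier_available_py, classifier_available_py_alt, pvAGo, pvMeta, pvNeeds, pvAll, List.foldl, List.filter, List.contains_cons, List.contains_nil, hs, hx, hl, hc]
  by_cases h10 : code = "NB"
  case pos =>
    subst h10
    cases hs : pvGetD deps "sklearn" <;> cases hx : pvGetD deps "xgboost" <;> cases hl : pvGetD deps "lightgbm" <;> cases hc : pvGetD deps "catboost" <;>
      simp [classifier_available_py, classifier_available_py_alt, pvAGo, pvMeta, pvNeeds, pvAll, List.foldl, List.filter, List.contains_cons, List.contains_nil, hs, hx, hl, hc]
  by_cases h11 : code = "MLP"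
  case pos =>
    subst h11
    cases hs : pvGetD deps "sklearn" <;> cases hx : pvGetD deps "xgboost" <;> cases hl : pvGetD deps "lightgbm" <;> cases hc : pvGetD deps "catboost" <;>
      simp [classifier_available_py, classifier_available_py_alt, pvAGo, pvMeta, pvNeeds, pvAll, List.foldl, List.filter, List.contains_cons, List.contains_nil, hs, hx, hl, hc]
  have e0 : (("GMM" : String) == code) = false := beq_eq_false_iff_ne.mpr (fun e => h0 e.symm)
  have f0 : (code == ("GMM" : String)) = false := beq_eq_false_iff_ne.mpr h0
  have e1 : (("RF" : String) == code) = false := beq_eq_false_iff_ne.mpr (fun e => h1 e.symm)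
  have f1 : (code == ("RF" : String)) = false := beq_eq_false_iff_ne.mpr h1
  have e2 : (("SVM" : String) == code) = false := beq_eq_false_iff_ne.mpr (fun e => h2 e.symm)
  have f2 : (code == ("SVM" : String)) = false := beq_eq_false_iff_ne.mpr h2
  have e3 : (("KNN" : String) == code) = false := beq_eq_false_iff_ne.mpr (fun e => h3 e.symm)
  have f3 : (code == ("KNN" : String)) = false := beq_eq_false_iff_ne.mpr h3
  have e4 : (("XGB" : String) == code) = false := beq_eq_false_iff_ne.mpr (fun e => h4 e.symm)
  have f4 : (code == ("XGB" : String)) = false := beq_eq_false_iff_ne.mpr h4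
  have e5 : (("LGB" : String) == code) = false := beq_eq_false_iff_ne.mpr (fun e => h5 e.symm)
  have f5 : (code == ("LGB" : String)) = false := beq_eq_false_iff_ne.mpr h5
  have e6 : (("CB" : String) == code) = false := beq_eq_false_iff_ne.mpr (fun e => h6 e.symm)
  have f6 : (code == ("CB" : String)) = false := beq_eq_false_iff_ne.mpr h6
  have e7 : (("ET" : String) == code) = false := beq_eq_false_iff_ne.mpr (fun e => h7 e.symm)
  have f7 : (code == ("ET" : String)) = false := beq_eq_false_iff_ne.mpr h7
  have e8 : (("GBC" : String) == code) = false := beq_eq_false_iff_ne.mpr (fun e => h8 e.symm)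
  have f8 : (code == ("GBC" : String)) = false := beq_eq_false_iff_ne.mpr h8
  have e9 : (("LR" : String) == code) = false := beq_eq_false_iff_ne.mpr (fun e => h9 e.symm)
  have f9 : (code == ("LR" : String)) = false := beq_eq_false_iff_ne.mpr h9
  have e10 : (("NB" : String) == code) = false := beq_eq_false_iff_ne.mpr (fun e => h10 e.symm)
  have f10 : (code == ("NB" : String)) = false := beq_eq_false_iff_ne.mpr h10
  have e11 : (("MLP" : String) == code) = false := beq_eq_false_iff_ne.mpr (fun e => h11 e.symm)
  have f11 : (code == ("MLP" : String)) = false := beq_eq_false_iff_ne.mpr h11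
  cases hs : pvGetD deps "sklearn" <;> cases hx : pvGetD deps "xgboost" <;> cases hl : pvGetD deps "lightgbm" <;> cases hc : pvGetD deps "catboost" <;>
    (simp [classifier_available_py, classifier_available_py_alt, pvAGo, pvMeta, pvNeeds, pvAll, List.foldl, List.filter, List.contains_cons, List.contains_nil, hs, hx, hl, hc, e0, f0, e1, f1, e2, f2, e3, f3, e4, f4, e5, f5, e6, f6, e7, f7, e8, f8, e9, f9, e10, f10, e11, f11]; all_goals (repeat' apply And.intro); all_goals assumption)
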